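-- pv_equiv track=rewrite | github.com/FreddyMachaca/INF-111 | PRACTICA PRIMER PARCIAL/Ejercicio30/Python/NuevaSerie.py | generar_serie
-- ===== SOURCE A (Python) =====
-- def generar_serie(n):
--     serie = []
--     for i in range(n):
--         if i % 3 == 0:
--             serie.append(5 + i // 3 * 9)
--         else:
--             serie.append(3 - i % 3 * 2)
--     return serie
-- ===== SOURCE B (Python) =====
-- def generar_serie(n):
--     serie = []
--     remaining = n if n > 0 else 0
--     k = 0
--     while remaining > 0:
--         serie.extend([5 + 9 * k, 1, -1][:remaining])
--         remaining = max(remaining - 3, 0)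
--         k += 1
--     return serie
-- ===== Notes on version B (the rewrite author's own statement) =====
-- stated objective: alternative
-- what changed: Replaces the per-index modulo/floordiv branch with an outer loop over period-3 blocks that emits the precomputed triple (5+9k, 1, -1) and truncates the last block, removing all mod/div arithmetic from the loop.
import Mathlib
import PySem

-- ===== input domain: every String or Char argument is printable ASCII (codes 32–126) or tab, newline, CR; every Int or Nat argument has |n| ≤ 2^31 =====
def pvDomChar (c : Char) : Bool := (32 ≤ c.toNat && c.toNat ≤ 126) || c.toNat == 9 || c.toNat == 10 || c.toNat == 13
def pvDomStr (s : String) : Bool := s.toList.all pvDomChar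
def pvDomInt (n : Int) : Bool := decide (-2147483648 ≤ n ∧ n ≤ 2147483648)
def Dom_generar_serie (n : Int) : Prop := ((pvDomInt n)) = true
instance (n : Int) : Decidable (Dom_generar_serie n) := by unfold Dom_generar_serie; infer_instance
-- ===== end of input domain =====

-- B replaces the per-index modulo branch with an outer loop over period-3 blocks emitting (5+9k, 1, -1), truncating the last block.

-- ===== PORT A =====
def generar_serie (n : Int) : List Int :=
  (PySem.List.pyRange 0 n 1).foldl
    (fun serie i =>
      if PySem.Int.mod i 3 == 0 then serie ++ [5 + PySem.Int.floordiv i 3 * 9]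
      else serie ++ [3 - PySem.Int.mod i 3 * 2]) []

-- ===== PORT B =====
-- while remaining > 0: extend with the (truncated) block, remaining = max(remaining-3,0), k += 1
def emitBlocks : Nat → Int → List Int
  | 0, _ => []
  | Nat.succ r, k => ([5 + 9 * k, 1, -1].take (r + 1)) ++ emitBlocks (r - 2) (k + 1)

def generar_serie_alt (n : Int) : List Int :=
  emitBlocks (if n > 0 then n else 0).toNat 0

-- ===== PRECONDITION & SPEC =====
def Spec_generar_serie (n : Int) (out : List Int) : Prop := out = generar_serie_alt n
instance (n : Int) (out : List Int) : Decidable (Spec_generar_serie n out) := by unfold Spec_generar_serie; infer_instance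

-- ===== CLAIM (what is proved, stated in full; the proofs are below) =====
def Claim_equal_generar_serie : Prop := ∀ (n : Int), Dom_generar_serie n → Spec_generar_serie n (generar_serie n)

-- ===== LEMMAS AND PROOFS =====

def pvF (i : Int) : Int :=
  if PySem.Int.mod i 3 == 0 then 5 + PySem.Int.floordiv i 3 * 9 else 3 - PySem.Int.mod i 3 * 2

theorem pvA_foldl (l : List Int) (acc : List Int) :
    l.foldl (fun serie i =>
      if PySem.Int.mod i 3 == 0 then serie ++ [5 + PySem.Int.floordiv i 3 * 9]
      else serie ++ [3 - PySem.Int.mod i 3 * 2]) acc = acc ++ l.map pvF := by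
  induction l generalizing acc with
  | nil => simp
  | cons x xs ih =>
    rw [List.foldl_cons, List.map_cons, ih]
    unfold pvF
    split <;> simp

theorem pvF_3k (k : Int) : pvF (3 * k) = 5 + 9 * k := by
  simp [pvF]; ring

theorem pvF_3k1 (k : Int) : pvF (3 * k + 1) = 1 := by
  simp [pvF]

theorem pvF_3k2 (k : Int) : pvF (3 * k + 2) = -1 := by
  simp [pvF]

theorem pvEmit (r : Nat) : ∀ k : Int,
    emitBlocks r k = (List.range r).map (fun j : Nat => pvF (3 * k + (j : Int))) := by
  induction r using Nat.strong_induction_on with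
  | _ r ih =>
    intro k
    match r with
    | 0 => simp [emitBlocks]
    | 1 =>
      simp [emitBlocks, List.range_succ, pvF_3k k]
    | 2 =>
      have h0 := pvF_3k k
      have h1 := pvF_3k1 k
      simp [emitBlocks, List.range_succ]
      exact ⟨h0.symm, by simpa using h1.symm⟩
    | (m + 3) =>
      have hrec := ih m (by omega) (k + 1)
      have hstep : emitBlocks (m + 3) k = [5 + 9 * k, 1, -1] ++ emitBlocks m (k + 1) := by
        simp [emitBlocks]
      rw [hstep, hrec]
      have hsplit : List.range (m + 3) = List.range 3 ++ (List.range m).map (fun x => 3 + x) := by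
        simpa [Nat.add_comm] using List.range_add (n := 3) (m := m)
      rw [hsplit, List.map_append]
      congr 1
      · have h0 := pvF_3k k
        have h1 := pvF_3k1 k
        have h2 := pvF_3k2 k
        simp [List.range_succ]
        exact ⟨h0.symm, by simpa using h1.symm, by simpa using h2.symm⟩
      · rw [List.map_map]
        apply List.map_congr_left
        intro j _
        simp only [Function.comp]
        congr 1
        push_cast
        ring

theorem pvPorts (n : Int) : generar_serie n = generar_serie_alt n := by
  unfold generar_serie generar_serie_alt
  rw [pvA_foldl, PySem.List.pyRange_one, pvEmit]
  simp only [List.map_map, List.nil_append]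
  by_cases hn : n > 0
  · simp only [if_pos hn]
    have h1 : (n - 0).toNat = n.toNat := by omega
    rw [h1]
    apply List.map_congr_left
    intro j _
    simp only [Function.comp]
    congr 1
  · simp only [if_neg hn]
    simp
    omega

-- ===== VERDICT (by name: the statement is the Claim_ definition above) =====
theorem generar_serie_spec : Claim_equal_generar_serie := by
  intro n _
  unfold Spec_generar_serie
  exact pvPorts n
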